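-- pv_equiv track=rewrite | github.com/AlexStefanos/CoursMaster | L1/S1/Algo1/TP/TP8/mastermind.py | nb_mal_places
-- ===== SOURCE A (Python) =====
-- def nb_mal_places(proposition,solution):
--     e=0
--     for v in range (0,5):
--         if (proposition[v] in solution) and (proposition[v] != solution[v]):
--             e=e+1
--             v=v+1
--         else:
--             v=v+1
--     return e
-- ===== SOURCE B (Python) =====
-- def nb_mal_places(proposition, solution):
--     # Count-subtraction decomposition: pegs present anywhere minus pegs exactly placed.
--     present = sum(1 for v in range(5) if proposition[v] in solution)
--     correct = sum(1 for v in range(5)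
--                   if proposition[v] in solution and proposition[v] == solution[v])
--     return present - correct
-- ===== Notes on version B (the rewrite author's own statement) =====
-- stated objective: alternative
-- what changed: Replaces the single accumulator loop testing 'present and misplaced' per peg by two independent counts (pegs present in the solution, pegs exactly placed) and returns their difference.
import Mathlib
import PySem

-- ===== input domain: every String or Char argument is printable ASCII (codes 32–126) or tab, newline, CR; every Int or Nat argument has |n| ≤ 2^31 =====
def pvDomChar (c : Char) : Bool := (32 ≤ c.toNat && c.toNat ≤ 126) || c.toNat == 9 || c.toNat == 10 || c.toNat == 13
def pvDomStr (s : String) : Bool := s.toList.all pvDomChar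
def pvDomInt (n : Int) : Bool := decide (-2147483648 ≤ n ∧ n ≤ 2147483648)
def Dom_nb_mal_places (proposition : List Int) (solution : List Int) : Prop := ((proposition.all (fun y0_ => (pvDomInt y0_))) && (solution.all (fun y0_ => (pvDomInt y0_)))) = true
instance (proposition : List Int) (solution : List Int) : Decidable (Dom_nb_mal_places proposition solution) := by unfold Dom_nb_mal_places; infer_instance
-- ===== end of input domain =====

-- B replaces A's single accumulator loop ("present and misplaced" per peg) by two independent counts (present pegs, exactly-placed pegs) subtracted; same cost, different decomposition.


-- ===== PORT A =====
def nb_mal_places (proposition : List Int) (solution : List Int) : Int :=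
  (PySem.List.pyRange 0 5 1).foldl (fun e v =>
    match PySem.List.pyGet? proposition v with
    | none => e            -- IndexError (dead under Pre_)
    | some x =>
      if x ∈ solution then
        match PySem.List.pyGet? solution v with
        | none => e        -- IndexError (dead under Pre_)
        | some y => if x ≠ y then e + 1 else e
      else e) 0

-- ===== PORT B =====
def nb_mal_places_alt (proposition : List Int) (solution : List Int) : Int :=
  let present := ((PySem.List.pyRange 0 5 1).filter (fun v =>
      match PySem.List.pyGet? proposition v with
      | some x => decide (x ∈ solution)
      | none => false)).length
  let correct := ((PySem.List.pyRange 0 5 1).filter (fun v =>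
      match PySem.List.pyGet? proposition v with
      | some x => decide (x ∈ solution) && (PySem.List.pyGet? solution v == some x)
      | none => false)).length
  (present : Int) - (correct : Int)

-- ===== PRECONDITION & SPEC =====
-- Pre_ excludes exactly the inputs on which A raises IndexError: a proposition shorter
-- than 5, or a peg present in the solution at a position beyond the solution's length.
def Pre_nb_mal_places (proposition : List Int) (solution : List Int) : Prop :=
  5 ≤ proposition.length ∧ ∀ v < 5, proposition.getD v 0 ∈ solution → v < solution.length
instance (proposition : List Int) (solution : List Int) : Decidable (Pre_nb_mal_places proposition solution) := by unfold Pre_nb_mal_places; infer_instance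
def pvWitness_nb_mal_places : List Int × List Int := ([1, 2, 3, 4, 5], [5, 4, 3, 2, 1])
def Spec_nb_mal_places (proposition : List Int) (solution : List Int) (out : Int) : Prop := out = nb_mal_places_alt proposition solution
instance (proposition : List Int) (solution : List Int) (out : Int) : Decidable (Spec_nb_mal_places proposition solution out) := by unfold Spec_nb_mal_places; infer_instance

-- ===== CLAIM (what is proved, stated in full; the proofs are below) =====
def Claim_equal_nb_mal_places : Prop := ∀ (proposition : List Int) (solution : List Int), Dom_nb_mal_places proposition solution → Pre_nb_mal_places proposition solution → Spec_nb_mal_places proposition solution (nb_mal_places proposition solution)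

-- ===== LEMMAS AND PROOFS =====

-- A's loop body, named for the proofs (definitionally the lambda inside nb_mal_places).
def stepA (p s : List Int) (e : Int) (v : Int) : Int :=
  match PySem.List.pyGet? p v with
  | none => e
  | some x =>
    if x ∈ s then
      match PySem.List.pyGet? s v with
      | none => e
      | some y => if x ≠ y then e + 1 else e
    else e

-- B's two filter predicates, named for the proofs.
def fp (p s : List Int) (v : Int) : Bool :=
  match PySem.List.pyGet? p v with
  | some x => decide (x ∈ s)
  | none => false

def fc (p s : List Int) (v : Int) : Bool :=
  match PySem.List.pyGet? p v with
  | some x => decide (x ∈ s) && (PySem.List.pyGet? s v == some x)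
  | none => false

-- At index v, if the peg is present then indexing the solution does not fail.
def guard' (p s : List Int) (v : Int) : Prop :=
  ∀ x, PySem.List.pyGet? p v = some x → x ∈ s → PySem.List.pyGet? s v ≠ none

theorem step_eq (p s : List Int) (e : Int) (v : Int) (hg : guard' p s v) :
    stepA p s e v = e + (if fp p s v then 1 else 0) - (if fc p s v then 1 else 0) := by
  unfold stepA fp fc guard' at *
  rcases hx : PySem.List.pyGet? p v with _ | x
  · simp
  · by_cases hm : x ∈ s
    · rcases hy : PySem.List.pyGet? s v with _ | y
      · exact absurd hy (hg x hx hm)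
      · by_cases he : x = y
        · subst he; simp [hm]
        · have hne : ¬ (y = x) := fun h => he h.symm
          simp [hm, he, hne]
    · simp [hm]

theorem fold_eq (p s : List Int) (L : List Int) (e : Int)
    (hg : ∀ v ∈ L, guard' p s v) :
    L.foldl (stepA p s) e =
      e + ((L.filter (fp p s)).length : Int) - ((L.filter (fc p s)).length : Int) := by
  induction L generalizing e with
  | nil => simp
  | cons a t ih =>
    have ha := hg a (List.mem_cons_self)
    have ht : ∀ v ∈ t, guard' p s v := fun v hv => hg v (List.mem_cons_of_mem _ hv)
    simp only [List.foldl_cons, List.filter_cons, ih _ ht, step_eq p s e a ha]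
    by_cases h1 : fp p s a <;> by_cases h2 : fc p s a <;> simp [h1, h2] <;> omega

-- ===== VERDICT (by name: the statement is the Claim_ definition above) =====
theorem nb_mal_places_spec : Claim_equal_nb_mal_places := by
  intro p s _ hpre
  obtain ⟨hlen, hmem⟩ := hpre
  have hg : ∀ v ∈ PySem.List.pyRange 0 5 1, guard' p s v := by
    intro v hv x hx hxs
    rw [PySem.List.mem_pyRange_one] at hv
    have hv' : v = ((v.toNat : Nat) : Int) := by omega
    have hlt : v.toNat < p.length := by omega
    rw [hv', PySem.List.pyGet?_natCast, List.getElem?_eq_getElem hlt] at hx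
    have hxv : x = p[v.toNat] := by simpa using hx.symm
    have hsl : v.toNat < s.length := by
      apply hmem v.toNat (by omega)
      rw [List.getD_eq_getElem _ _ hlt]; rwa [← hxv]
    rw [hv', PySem.List.pyGet?_natCast, List.getElem?_eq_getElem hsl]
    simp
  have hA : nb_mal_places p s = (PySem.List.pyRange 0 5 1).foldl (stepA p s) 0 := rfl
  have hB : nb_mal_places_alt p s =
      (((PySem.List.pyRange 0 5 1).filter (fp p s)).length : Int)
      - (((PySem.List.pyRange 0 5 1).filter (fc p s)).length : Int) := rfl
  show nb_mal_places p s = nb_mal_places_alt p s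
  rw [hA, hB, fold_eq p s _ 0 hg]; omega
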